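-- pv_equiv track=rewrite | github.com/ASILBEKasilbek/PYTHON_1-semetr | nested_loop2/6.py | create_initial_pattern
-- ===== SOURCE A (Python) =====
-- def create_initial_pattern(n):
--     pattern = []
--     for i in range(n):
--         if i < n // 2:
--             pattern.append(" " * i + "*" * (n - 2 * i) + " " * i)
--         elif i == n // 2:
--             pattern.append(" " * i + "*")
--         else:
--             pattern.append(" " * (n - i - 1) + "*" + " " * (2 * i - n) + "*" + " " * (n - i - 1))
--     return pattern
-- ===== SOURCE B (Python) =====
-- def create_initial_pattern(n):
--     h = n // 2
--
--     def row_spec(i):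
--         """Width of row i and the collection of column indices holding a star."""
--         if i < h:
--             return n, range(i, n - i)
--         if i == h:
--             return i + 1, (i,)
--         return n, (n - i - 1, i)
--
--     rows = []
--     for i in range(n):
--         w, stars = row_spec(i)
--         row = [' '] * w
--         for c in stars:
--             row[c] = '*'
--         rows.append(''.join(row))
--     return rows
-- ===== Notes on version B (the rewrite author's own statement) =====
-- stated objective: alternative
-- what changed: B first computes, for each row, its width and the collection of star column indices, then renders the row by scattering stars into a blank buffer, instead of A's arithmetic concatenation of repeated space/star run strings.
import Mathlib
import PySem

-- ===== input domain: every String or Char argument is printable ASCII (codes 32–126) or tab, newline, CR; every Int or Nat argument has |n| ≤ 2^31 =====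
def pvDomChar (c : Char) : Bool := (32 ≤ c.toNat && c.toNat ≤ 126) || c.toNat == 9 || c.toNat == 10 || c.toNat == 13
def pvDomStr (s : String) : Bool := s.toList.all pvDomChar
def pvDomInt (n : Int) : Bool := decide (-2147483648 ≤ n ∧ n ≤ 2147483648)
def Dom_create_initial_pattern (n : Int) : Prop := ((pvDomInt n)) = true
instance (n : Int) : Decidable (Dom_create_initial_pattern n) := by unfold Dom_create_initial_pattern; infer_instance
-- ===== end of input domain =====

-- B computes each row's width and star-column positions first, then scatters the stars into a blank buffer, instead of A's concatenation of space/star run strings (alternative decomposition, same cost).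

-- ===== PORT A =====
def create_initial_pattern (n : Int) : List String :=
  (PySem.List.pyRange 0 n 1).foldl (fun pattern i =>
    if i < PySem.Int.floordiv n 2 then
      pattern ++ [String.mk (List.replicate i.toNat ' ' ++ List.replicate (n - 2 * i).toNat '*' ++ List.replicate i.toNat ' ')]
    else if i = PySem.Int.floordiv n 2 then
      pattern ++ [String.mk (List.replicate i.toNat ' ' ++ ['*'])]
    else
      pattern ++ [String.mk (List.replicate (n - i - 1).toNat ' ' ++ ['*'] ++ List.replicate (2 * i - n).toNat ' ' ++ ['*'] ++ List.replicate (n - i - 1).toNat ' ')]) []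

-- ===== PORT B =====
-- row_spec(i) of Source B: the row's width and the collection of star column indices.
def pv_row_spec (n h i : Int) : Int × List Int :=
  if i < h then (n, PySem.List.pyRange i (n - i) 1)
  else if i = h then (i + 1, [i])
  else (n, [n - i - 1, i])

-- row = [' ']*w; for c in stars: row[c] = '*'  — each row[c] = '*' is List.set
-- (exact: every star index c of row_spec satisfies 0 ≤ c < w on 0 ≤ i < n).
def create_initial_pattern_alt (n : Int) : List String :=
  let h := PySem.Int.floordiv n 2
  (PySem.List.pyRange 0 n 1).foldl (fun rows i =>
    let spec := pv_row_spec n h i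
    let row := spec.2.foldl (fun r c => r.set c.toNat '*') (List.replicate spec.1.toNat ' ')
    rows ++ [String.mk row]) []

-- ===== PRECONDITION & SPEC =====
def Spec_create_initial_pattern (n : Int) (out : List String) : Prop := out = create_initial_pattern_alt n
instance (n : Int) (out : List String) : Decidable (Spec_create_initial_pattern n out) := by unfold Spec_create_initial_pattern; infer_instance

-- ===== CLAIM (what is proved, stated in full; the proofs are below) =====
def Claim_equal_create_initial_pattern : Prop := ∀ (n : Int), Dom_create_initial_pattern n → Spec_create_initial_pattern n (create_initial_pattern n)

-- ===== LEMMAS AND PROOFS =====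

-- Scattering '*' over the contiguous index range [a, a+k) of a buffer l.
theorem pv_scatter (k : Nat) (a : Int) (l : List Char) (h0 : 0 ≤ a) (hk : a + k ≤ l.length) :
    (PySem.List.pyRange a (a + k) 1).foldl (fun r c => r.set c.toNat '*') l
    = l.take a.toNat ++ List.replicate k '*' ++ l.drop (a.toNat + k) := by
  induction k with
  | zero =>
    rw [show a + (0 : Nat) = a by omega, PySem.List.pyRange_one_eq_nil (le_refl a)]
    simp [List.take_append_drop]
  | succ k ih =>
    have hk' : a + k ≤ l.length := by omega
    rw [show a + ((k + 1 : Nat) : Int) = (a + k) + 1 by omega,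
        PySem.List.pyRange_one_succ_right (by omega), List.foldl_append, ih hk']
    simp only [List.foldl_cons, List.foldl_nil]
    apply List.ext_getElem
    · simp only [List.length_set, List.length_append, List.length_take, List.length_replicate, List.length_drop]
      omega
    · intro m hm1 hm2
      simp only [List.getElem_set, List.getElem_append, List.length_take, List.length_replicate,
        List.getElem_take, List.getElem_replicate, List.getElem_drop, List.length_append]
      split_ifs <;> (try rfl) <;> (try omega) <;> (congr 1; omega)

-- Rows above the middle: scattering stars over columns i..n-i-1 of a blank row = A's run concatenation.
theorem pv_case1 (n i : Int) (h0 : 0 ≤ i) (hc : i < n / 2) :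
    (PySem.List.pyRange i (n - i) 1).foldl (fun r c => r.set c.toNat '*') (List.replicate n.toNat ' ')
    = List.replicate i.toNat ' ' ++ List.replicate (n - 2 * i).toNat '*' ++ List.replicate i.toNat ' ' := by
  have hni : n - i = i + ((n - 2 * i).toNat : Int) := by omega
  rw [hni, pv_scatter (n - 2 * i).toNat i (List.replicate n.toNat ' ') h0 (by simp; omega),
      List.take_replicate, List.drop_replicate]
  have h1 : min i.toNat n.toNat = i.toNat := by omega
  have h2 : n.toNat - (i.toNat + (n - 2 * i).toNat) = i.toNat := by omega
  rw [h1, h2]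

-- The middle row: a single star written at column i of a blank row of width i+1.
theorem pv_case2 (n i : Int) (h0 : 0 ≤ i) :
    ([i] : List Int).foldl (fun r c => r.set c.toNat '*') (List.replicate (i + 1).toNat ' ')
    = List.replicate i.toNat ' ' ++ ['*'] := by
  simp only [List.foldl_cons, List.foldl_nil]
  apply List.ext_getElem
  · simp; omega
  · intro m hm1 hm2
    simp only [List.getElem_set, List.getElem_append, List.getElem_replicate, List.length_replicate, List.getElem_singleton]
    simp only [List.length_set, List.length_replicate] at hm1
    split_ifs <;> (try rfl) <;> omega

-- Rows below the middle: stars written at columns n-i-1 and i of a blank row of width n.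
theorem pv_case3 (n i : Int) (h0 : 0 ≤ i) (h1 : i < n) (hc1 : ¬ i < n / 2) (hc2 : ¬ i = n / 2) :
    ([n - i - 1, i] : List Int).foldl (fun r c => r.set c.toNat '*') (List.replicate n.toNat ' ')
    = List.replicate (n - i - 1).toNat ' ' ++ ['*'] ++ List.replicate (2 * i - n).toNat ' ' ++ ['*'] ++ List.replicate (n - i - 1).toNat ' ' := by
  simp only [List.foldl_cons, List.foldl_nil]
  apply List.ext_getElem
  · simp; omega
  · intro m hm1 hm2
    simp only [List.getElem_set, List.getElem_append, List.getElem_replicate, List.length_replicate, List.getElem_singleton, List.length_append, List.length_singleton]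
    simp only [List.length_set, List.length_replicate] at hm1
    split_ifs <;> (try rfl) <;> omega

-- The row produced by A's loop body equals B's spec-and-scatter row, for every 0 ≤ i < n.
theorem pv_row_eq (n i : Int) (h0 : 0 ≤ i) (h1 : i < n) :
    (if i < PySem.Int.floordiv n 2 then
      String.mk (List.replicate i.toNat ' ' ++ List.replicate (n - 2 * i).toNat '*' ++ List.replicate i.toNat ' ')
    else if i = PySem.Int.floordiv n 2 then
      String.mk (List.replicate i.toNat ' ' ++ ['*'])
    else
      String.mk (List.replicate (n - i - 1).toNat ' ' ++ ['*'] ++ List.replicate (2 * i - n).toNat ' ' ++ ['*'] ++ List.replicate (n - i - 1).toNat ' '))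
    =
    String.mk ((pv_row_spec n (PySem.Int.floordiv n 2) i).2.foldl (fun r c => r.set c.toNat '*')
      (List.replicate (pv_row_spec n (PySem.Int.floordiv n 2) i).1.toNat ' ')) := by
  have hd : PySem.Int.floordiv n 2 = n / 2 := PySem.Int.floordiv_eq_ediv_of_pos (by omega)
  simp only [hd, pv_row_spec]
  by_cases hc1 : i < n / 2
  · simp only [if_pos hc1]
    exact congrArg String.mk (pv_case1 n i h0 hc1).symm
  · by_cases hc2 : i = n / 2
    · simp only [if_neg hc1, if_pos hc2]
      exact congrArg String.mk (pv_case2 n i h0).symm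
    · simp only [if_neg hc1, if_neg hc2]
      exact congrArg String.mk (pv_case3 n i h0 h1 hc1 hc2).symm

-- ===== VERDICT (by name: the statement is the Claim_ definition above) =====
theorem create_initial_pattern_spec : Claim_equal_create_initial_pattern := by
  intro n _
  show create_initial_pattern n = create_initial_pattern_alt n
  unfold create_initial_pattern create_initial_pattern_alt
  have hfunA : (fun (pattern : List String) (i : Int) =>
      if i < PySem.Int.floordiv n 2 then
        pattern ++ [String.mk (List.replicate i.toNat ' ' ++ List.replicate (n - 2 * i).toNat '*' ++ List.replicate i.toNat ' ')]
      else if i = PySem.Int.floordiv n 2 then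
        pattern ++ [String.mk (List.replicate i.toNat ' ' ++ ['*'])]
      else
        pattern ++ [String.mk (List.replicate (n - i - 1).toNat ' ' ++ ['*'] ++ List.replicate (2 * i - n).toNat ' ' ++ ['*'] ++ List.replicate (n - i - 1).toNat ' ')])
    = (fun (pattern : List String) (i : Int) => pattern ++
        [if i < PySem.Int.floordiv n 2 then
          String.mk (List.replicate i.toNat ' ' ++ List.replicate (n - 2 * i).toNat '*' ++ List.replicate i.toNat ' ')
        else if i = PySem.Int.floordiv n 2 then
          String.mk (List.replicate i.toNat ' ' ++ ['*'])
        else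
          String.mk (List.replicate (n - i - 1).toNat ' ' ++ ['*'] ++ List.replicate (2 * i - n).toNat ' ' ++ ['*'] ++ List.replicate (n - i - 1).toNat ' ')]) := by
    funext p i; split_ifs <;> rfl
  rw [hfunA, PySem.List.foldl_append_singleton_eq_map, PySem.List.foldl_append_singleton_eq_map]
  simp only [List.nil_append]
  apply List.map_congr_left
  intro i hi
  rw [PySem.List.mem_pyRange_one] at hi
  exact pv_row_eq n i hi.1 hi.2
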